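-- pv_equiv track=rewrite | github.com/Margarita89/AlgorithmsAndDataStructures | Cracking the Coding Interview/8_Recursion and Dynamic Programming/8_1.py | TripleStep
-- ===== SOURCE A (Python) =====
-- def TripleStep(n):
--     if (n == 0) | (n == 1) | (n == 2):
--         return n
--
--     a = 1
--     b = 1
--     c = 2
--     for i in range(3, n):
--         counter = a + b + c
--         a = b
--         b = c
--         c = counter
--
--     return a + b + c
-- ===== SOURCE B (Python) =====
-- def TripleStep(n):
--     if n == 0 or n == 1 or n == 2:
--         return n
--     def mul(A, B):
--         return tuple(tuple(sum(A[i][k] * B[k][j] for k in range(3)) for j in range(3))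
--                      for i in range(3))
--     M = ((1, 1, 1), (1, 0, 0), (0, 1, 0))
--     R = ((1, 0, 0), (0, 1, 0), (0, 0, 1))
--     e = n - 3
--     while e > 0:
--         if e % 2 == 1:
--             R = mul(R, M)
--         M = mul(M, M)
--         e //= 2
--     # apply R = M0^(n-3) to the seed column (2, 1, 1) and sum the components
--     x = R[0][0] * 2 + R[0][1] + R[0][2]
--     y = R[1][0] * 2 + R[1][1] + R[1][2]
--     z = R[2][0] * 2 + R[2][1] + R[2][2]
--     return x + y + z
-- ===== Notes on version B (the rewrite author's own statement) =====
-- stated objective: alternative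
-- what changed: Replaced the three-variable O(n)-iteration tribonacci loop by binary exponentiation of the 3x3 companion matrix (O(log n) matrix multiplications; big-integer arithmetic dominates both at large sizes).
import Mathlib
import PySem

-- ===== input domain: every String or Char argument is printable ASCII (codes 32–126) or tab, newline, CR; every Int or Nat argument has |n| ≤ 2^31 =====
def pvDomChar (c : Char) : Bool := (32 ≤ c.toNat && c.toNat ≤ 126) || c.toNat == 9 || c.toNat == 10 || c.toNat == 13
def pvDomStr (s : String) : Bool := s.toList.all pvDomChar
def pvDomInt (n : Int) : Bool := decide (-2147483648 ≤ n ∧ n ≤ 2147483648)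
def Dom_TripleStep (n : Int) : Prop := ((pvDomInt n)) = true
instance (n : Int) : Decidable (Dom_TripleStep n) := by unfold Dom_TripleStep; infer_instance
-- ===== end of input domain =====

-- B replaces A's three-variable iteration loop by binary exponentiation of the 3x3
-- companion matrix; the proofs show the return values agree on every Int input.

-- ===== PORT A =====
def TripleStep (n : Int) : Int :=
  if n = 0 ∨ n = 1 ∨ n = 2 then n
  else
    let s := (PySem.List.pyRange 3 n 1).foldl
      (fun (st : Int × Int × Int) _ => (st.2.1, st.2.2, st.1 + st.2.1 + st.2.2)) (1, 1, 2)
    s.1 + s.2.1 + s.2.2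

-- ===== PORT B =====
-- 3x3 integer matrix as a tuple of rows, as in Source B
abbrev pvMat : Type := (Int × Int × Int) × (Int × Int × Int) × (Int × Int × Int)

def pvMul (A B : pvMat) : pvMat :=
  ((A.1.1 * B.1.1 + A.1.2.1 * B.2.1.1 + A.1.2.2 * B.2.2.1,
    A.1.1 * B.1.2.1 + A.1.2.1 * B.2.1.2.1 + A.1.2.2 * B.2.2.2.1,
    A.1.1 * B.1.2.2 + A.1.2.1 * B.2.1.2.2 + A.1.2.2 * B.2.2.2.2),
   (A.2.1.1 * B.1.1 + A.2.1.2.1 * B.2.1.1 + A.2.1.2.2 * B.2.2.1,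
    A.2.1.1 * B.1.2.1 + A.2.1.2.1 * B.2.1.2.1 + A.2.1.2.2 * B.2.2.2.1,
    A.2.1.1 * B.1.2.2 + A.2.1.2.1 * B.2.1.2.2 + A.2.1.2.2 * B.2.2.2.2),
   (A.2.2.1 * B.1.1 + A.2.2.2.1 * B.2.1.1 + A.2.2.2.2 * B.2.2.1,
    A.2.2.1 * B.1.2.1 + A.2.2.2.1 * B.2.1.2.1 + A.2.2.2.2 * B.2.2.2.1,
    A.2.2.1 * B.1.2.2 + A.2.2.2.1 * B.2.1.2.2 + A.2.2.2.2 * B.2.2.2.2))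

-- Source B's 'while e > 0' binary-exponentiation loop, state (R, M, e)
def pvPowLoop (R M : pvMat) (e : Int) : pvMat :=
  if h : 0 < e then
    pvPowLoop (if PySem.Int.mod e 2 = 1 then pvMul R M else R) (pvMul M M)
      (PySem.Int.floordiv e 2)
  else R
termination_by e.toNat
decreasing_by
  rw [PySem.Int.floordiv_eq_ediv_of_pos (by omega : (0:Int) < 2)]
  omega

def TripleStep_alt (n : Int) : Int :=
  if n = 0 ∨ n = 1 ∨ n = 2 then n
  else
    let R := pvPowLoop ((1,0,0),(0,1,0),(0,0,1)) ((1,1,1),(1,0,0),(0,1,0)) (n - 3)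
    let x := R.1.1 * 2 + R.1.2.1 + R.1.2.2
    let y := R.2.1.1 * 2 + R.2.1.2.1 + R.2.1.2.2
    let z := R.2.2.1 * 2 + R.2.2.2.1 + R.2.2.2.2
    x + y + z

-- ===== PRECONDITION & SPEC =====
def Spec_TripleStep (n : Int) (out : Int) : Prop := out = TripleStep_alt n
instance (n : Int) (out : Int) : Decidable (Spec_TripleStep n out) := by unfold Spec_TripleStep; infer_instance

-- ===== CLAIM (what is proved, stated in full; the proofs are below) =====
def Claim_equal_TripleStep : Prop := ∀ (n : Int), Dom_TripleStep n → Spec_TripleStep n (TripleStep n)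

-- ===== LEMMAS AND PROOFS =====

-- the tribonacci sequence both programs compute
def pvT : Nat → Int
  | 0 => 1
  | 1 => 1
  | 2 => 2
  | (k+3) => pvT (k+2) + pvT (k+1) + pvT k

def pvI : pvMat := ((1,0,0),(0,1,0),(0,0,1))
def pvM0 : pvMat := ((1,1,1),(1,0,0),(0,1,0))

theorem pvMul_assoc (A B C : pvMat) : pvMul (pvMul A B) C = pvMul A (pvMul B C) := by
  obtain ⟨⟨a1,a2,a3⟩,⟨b1,b2,b3⟩,c1,c2,c3⟩ := A
  obtain ⟨⟨d1,d2,d3⟩,⟨e1,e2,e3⟩,f1,f2,f3⟩ := B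
  obtain ⟨⟨g1,g2,g3⟩,⟨h1,h2,h3⟩,i1,i2,i3⟩ := C
  simp only [pvMul, Prod.mk.injEq]
  and_intros <;> ring

theorem pvMul_I (A : pvMat) : pvMul A pvI = A := by
  obtain ⟨⟨a1,a2,a3⟩,⟨b1,b2,b3⟩,c1,c2,c3⟩ := A
  simp only [pvMul, pvI, Prod.mk.injEq]
  and_intros <;> ring

theorem pvI_mul (A : pvMat) : pvMul pvI A = A := by
  obtain ⟨⟨a1,a2,a3⟩,⟨b1,b2,b3⟩,c1,c2,c3⟩ := A
  simp only [pvMul, pvI, Prod.mk.injEq]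
  and_intros <;> ring

def pvPow (M : pvMat) : Nat → pvMat
  | 0 => pvI
  | (k+1) => pvMul M (pvPow M k)

theorem pvPow_two_mul (M : pvMat) (k : Nat) : pvPow M (2*k) = pvPow (pvMul M M) k := by
  induction k with
  | zero => rfl
  | succ k ih =>
    have h : 2*(k+1) = (2*k+1)+1 := by ring
    rw [h]
    show pvMul M (pvMul M (pvPow M (2*k))) = pvMul (pvMul M M) (pvPow (pvMul M M) k)
    rw [ih, pvMul_assoc]

theorem pvPowLoop_eq (fuel : Nat) : ∀ (R M : pvMat) (e : Int), e.toNat ≤ fuel →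
    pvPowLoop R M e = pvMul R (pvPow M e.toNat) := by
  induction fuel with
  | zero =>
    intro R M e he
    have h0 : ¬ 0 < e := by omega
    rw [pvPowLoop]
    simp only [h0, dite_false]
    have : e.toNat = 0 := by omega
    rw [this]
    exact (pvMul_I R).symm
  | succ fuel ih =>
    intro R M e he
    by_cases h0 : 0 < e
    · rw [pvPowLoop]
      simp only [h0, dite_true]
      have hq : PySem.Int.floordiv e 2 = e / 2 :=
        PySem.Int.floordiv_eq_ediv_of_pos (by omega)
      have hm : PySem.Int.mod e 2 = e % 2 :=
        PySem.Int.mod_eq_emod_of_pos (by omega)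
      rw [ih _ _ _ (by rw [hq]; omega)]
      by_cases hpar : PySem.Int.mod e 2 = 1
      · have h1 : e % 2 = 1 := by rw [← hm]; exact hpar
        have hn : e.toNat = 2 * (PySem.Int.floordiv e 2).toNat + 1 := by rw [hq]; omega
        simp only [hpar, if_true]
        rw [hn]
        show pvMul (pvMul R M) (pvPow (pvMul M M) _) =
          pvMul R (pvMul M (pvPow M (2 * (PySem.Int.floordiv e 2).toNat)))
        rw [pvPow_two_mul, pvMul_assoc]
      · have h1 : e % 2 = 0 := by
          have := hpar; rw [hm] at this; omega
        have hn : e.toNat = 2 * (PySem.Int.floordiv e 2).toNat := by rw [hq]; omega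
        simp only [hpar, if_false]
        rw [hn, pvPow_two_mul]
    · rw [pvPowLoop]
      simp only [h0, dite_false]
      have : e.toNat = 0 := by omega
      rw [this]
      exact (pvMul_I R).symm

-- applying a matrix to the seed column (2,1,1)
def pvApp (A : pvMat) : Int × Int × Int :=
  (A.1.1 * 2 + A.1.2.1 + A.1.2.2,
   A.2.1.1 * 2 + A.2.1.2.1 + A.2.1.2.2,
   A.2.2.1 * 2 + A.2.2.2.1 + A.2.2.2.2)

theorem pvApp_M0_mul (P : pvMat) :
    pvApp (pvMul pvM0 P) = ((pvApp P).1 + (pvApp P).2.1 + (pvApp P).2.2, (pvApp P).1, (pvApp P).2.1) := by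
  obtain ⟨⟨a1,a2,a3⟩,⟨b1,b2,b3⟩,c1,c2,c3⟩ := P
  simp only [pvApp, pvMul, pvM0, Prod.mk.injEq]
  and_intros <;> ring

theorem pvApp_pow (k : Nat) : pvApp (pvPow pvM0 k) = (pvT (k+2), pvT (k+1), pvT k) := by
  induction k with
  | zero => rfl
  | succ k ih =>
    show pvApp (pvMul pvM0 (pvPow pvM0 k)) = _
    rw [pvApp_M0_mul, ih]
    show (pvT (k+2) + pvT (k+1) + pvT k, pvT (k+2), pvT (k+1)) = (pvT (k+3), pvT (k+2), pvT (k+1))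
    have h3 : pvT (k+2) + pvT (k+1) + pvT k = pvT (k+3) := by rw [pvT]
    rw [h3]

-- A's loop: fold over a list of length L takes (pvT j, pvT (j+1), pvT (j+2)) to the triple at j+L
theorem pvFoldA (l : List Int) : ∀ (j : Nat),
    l.foldl (fun (st : Int × Int × Int) _ => (st.2.1, st.2.2, st.1 + st.2.1 + st.2.2))
      (pvT j, pvT (j+1), pvT (j+2))
    = (pvT (j + l.length), pvT (j + l.length + 1), pvT (j + l.length + 2)) := by
  induction l with
  | nil => intro j; simp
  | cons x xs ih =>
    intro j
    show xs.foldl _ (pvT (j+1), pvT (j+2), pvT j + pvT (j+1) + pvT (j+2)) = _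
    have h3 : pvT j + pvT (j+1) + pvT (j+2) = pvT (j+1+2) := by
      show _ = pvT (j+3); rw [pvT]; ring
    have e1 : j + 1 + xs.length = j + (xs.length + 1) := by omega
    rw [h3, ih (j+1), List.length_cons, e1]

theorem pvBoth (n : Int) (h : ¬ (n = 0 ∨ n = 1 ∨ n = 2)) :
    TripleStep n = pvT ((n-3).toNat + 3) ∧ TripleStep_alt n = pvT ((n-3).toNat + 3) := by
  constructor
  · show TripleStep n = _
    rw [TripleStep]
    simp only [h, if_false]
    have hl : (PySem.List.pyRange 3 n 1).length = (n-3).toNat := PySem.List.length_pyRange_one 3 n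
    have := pvFoldA (PySem.List.pyRange 3 n 1) 0
    simp only [Nat.zero_add, hl] at this
    show ((PySem.List.pyRange 3 n 1).foldl _ ((1:Int),(1:Int),(2:Int))).1 + _ + _ = _
    have h012 : ((1:Int),(1:Int),(2:Int)) = (pvT 0, pvT 1, pvT 2) := rfl
    rw [h012, this]
    show pvT (n-3).toNat + pvT ((n-3).toNat + 1) + pvT ((n-3).toNat + 2) = pvT ((n-3).toNat + 3)
    rw [pvT]; ring
  · rw [TripleStep_alt]
    simp only [h, if_false]
    have key : pvPowLoop pvI pvM0 (n-3) = pvPow pvM0 (n-3).toNat := by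
      rw [pvPowLoop_eq (n-3).toNat _ _ _ (le_refl _), pvI_mul]
    show (pvApp (pvPowLoop pvI pvM0 (n-3))).1 + (pvApp (pvPowLoop pvI pvM0 (n-3))).2.1
        + (pvApp (pvPowLoop pvI pvM0 (n-3))).2.2 = _
    rw [key, pvApp_pow]
    show pvT ((n-3).toNat + 2) + pvT ((n-3).toNat + 1) + pvT (n-3).toNat = pvT ((n-3).toNat + 3)
    rw [pvT]

-- ===== VERDICT (by name: the statement is the Claim_ definition above) =====
theorem TripleStep_spec : Claim_equal_TripleStep := by
  intro n _
  unfold Spec_TripleStep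
  by_cases h : n = 0 ∨ n = 1 ∨ n = 2
  · rw [TripleStep, TripleStep_alt]; simp [h]
  · obtain ⟨hA, hB⟩ := pvBoth n h
    rw [hA, hB]
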